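-- pv_equiv track=rewrite | github.com/niushaneshati83/Da | 4 (1).py | max_prize
-- ===== SOURCE A (Python) =====
-- def max_prize(teams, start, end,n):
--
--     if start > end:
--         return 0
--     if start == end:
--         return teams[start]
--
--     mid=start
--     mid=mid+end
--     mid=mid//2
--
--     max_left = max(teams[start:mid + 1])
--     max_right = max(teams[mid + 1:end + 1 ])
--     prize_when_left_eliminated = max_prize(teams, start, mid,1 )
--
--     prize_when_right_eliminated = max_prize(teams, mid + 1, end,1 )
--
--     if max_left + prize_when_right_eliminated>max_right + prize_when_left_eliminated:
--         return max_left + prize_when_right_eliminated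
--     else:
--         return max_right + prize_when_left_eliminated
-- ===== SOURCE B (Python) =====
-- def max_prize(teams, start, end, n):
--     # One combined recursion returning (interval max, prize) per node,
--     # instead of A's separate max() scan over each half at every node.
--     if start > end:
--         return 0
--     def solve(s, e):
--         if s >= e:
--             return teams[s], teams[s]
--         mid = (s + e) // 2
--         ml, pl = solve(s, mid)
--         mr, pr = solve(mid + 1, e)
--         return max(ml, mr), max(ml + pr, mr + pl)
--     return solve(start, end)[1]
-- ===== Notes on version B (the rewrite author's own statement) =====
-- stated objective: alternative
-- what changed: B replaces A's per-node max() slice scans with one recursion that returns (interval maximum, prize) as a pair, touching each element O(1) times instead of O(log n) times; wall-clock stays similar because A's scans run in C.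
import Mathlib
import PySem

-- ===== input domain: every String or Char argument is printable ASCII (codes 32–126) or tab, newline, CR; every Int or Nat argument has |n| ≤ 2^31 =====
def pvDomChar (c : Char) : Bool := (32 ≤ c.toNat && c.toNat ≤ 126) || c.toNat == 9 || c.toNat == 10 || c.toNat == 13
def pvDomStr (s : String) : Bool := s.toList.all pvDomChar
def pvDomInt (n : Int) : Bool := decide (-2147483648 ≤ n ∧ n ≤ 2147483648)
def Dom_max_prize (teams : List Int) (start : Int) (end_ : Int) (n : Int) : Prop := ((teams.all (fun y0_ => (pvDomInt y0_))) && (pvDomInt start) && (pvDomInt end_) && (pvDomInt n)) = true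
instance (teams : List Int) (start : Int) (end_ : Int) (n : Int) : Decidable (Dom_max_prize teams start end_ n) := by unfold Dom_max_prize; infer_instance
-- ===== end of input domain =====

-- B computes the same divide-and-conquer prize with one recursion that returns
-- (interval max, prize) pairs instead of re-scanning slices with max() at each node
-- (fewer element touches; similar wall-clock in Python).

-- ===== PORT A =====
def max_prize (teams : List Int) (start : Int) (end_ : Int) (n : Int) : Int :=
  if start > end_ then 0
  else if start = end_ then (PySem.List.pyGet? teams start).getD 0
  else
    -- mid = start; mid = mid + end; mid = mid // 2
    let mid := PySem.Int.floordiv (start + end_) 2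
    let max_left := (PySem.List.max? (PySem.List.slice teams (some start) (some (mid + 1))) (fun y => y)).getD 0
    let max_right := (PySem.List.max? (PySem.List.slice teams (some (mid + 1)) (some (end_ + 1))) (fun y => y)).getD 0
    let prize_when_left_eliminated := max_prize teams start mid 1
    let prize_when_right_eliminated := max_prize teams (mid + 1) end_ 1
    if max_left + prize_when_right_eliminated > max_right + prize_when_left_eliminated then
      max_left + prize_when_right_eliminated
    else
      max_right + prize_when_left_eliminated
termination_by (end_ - start).toNat
decreasing_by
  · have hm : PySem.Int.floordiv (start + end_) 2 = (start + end_) / 2 :=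
      PySem.Int.floordiv_eq_ediv_of_pos (by omega)
    simp only [hm]; omega
  · have hm : PySem.Int.floordiv (start + end_) 2 = (start + end_) / 2 :=
      PySem.Int.floordiv_eq_ediv_of_pos (by omega)
    simp only [hm]; omega

-- ===== PORT B =====
def pvSolve (teams : List Int) (s : Int) (e : Int) : Int × Int :=
  if e ≤ s then
    let t := (PySem.List.pyGet? teams s).getD 0
    (t, t)
  else
    let mid := PySem.Int.floordiv (s + e) 2
    let L := pvSolve teams s mid
    let R := pvSolve teams (mid + 1) e
    (max L.1 R.1, max (L.1 + R.2) (R.1 + L.2))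
termination_by (e - s).toNat
decreasing_by
  · have hm : PySem.Int.floordiv (s + e) 2 = (s + e) / 2 :=
      PySem.Int.floordiv_eq_ediv_of_pos (by omega)
    simp only [hm]; omega
  · have hm : PySem.Int.floordiv (s + e) 2 = (s + e) / 2 :=
      PySem.Int.floordiv_eq_ediv_of_pos (by omega)
    simp only [hm]; omega

def max_prize_alt (teams : List Int) (start : Int) (end_ : Int) (n : Int) : Int :=
  if start > end_ then 0
  else (pvSolve teams start end_).2

-- ===== PRECONDITION & SPEC =====
-- Pre_ is exactly the set of inputs on which A returns normally: outside it the
-- Python raises IndexError (out-of-range singleton) or ValueError (max() of an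
-- empty slice, reached whenever the range mixes signs or ends at -1 with start < end).
def Pre_max_prize (teams : List Int) (start : Int) (end_ : Int) (n : Int) : Prop :=
  start > end_
  ∨ (0 ≤ start ∧ end_ < (teams.length : Int))
  ∨ (-(teams.length : Int) ≤ start ∧ start ≤ end_ ∧ end_ ≤ -2)
  ∨ (start = end_ ∧ -(teams.length : Int) ≤ start ∧ start < (teams.length : Int))
instance (teams : List Int) (start : Int) (end_ : Int) (n : Int) : Decidable (Pre_max_prize teams start end_ n) := by unfold Pre_max_prize; infer_instance

def pvWitness_max_prize : List Int × Int × Int × Int := ([3, 1, 4, 1, 5], 0, 4, 1)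

def Spec_max_prize (teams : List Int) (start : Int) (end_ : Int) (n : Int) (out : Int) : Prop := out = max_prize_alt teams start end_ n
instance (teams : List Int) (start : Int) (end_ : Int) (n : Int) (out : Int) : Decidable (Spec_max_prize teams start end_ n out) := by unfold Spec_max_prize; infer_instance

-- ===== CLAIM (what is proved, stated in full; the proofs are below) =====
def Claim_equal_max_prize : Prop := ∀ (teams : List Int) (start : Int) (end_ : Int) (n : Int), Dom_max_prize teams start end_ n → Pre_max_prize teams start end_ n → Spec_max_prize teams start end_ n (max_prize teams start end_ n)

-- ===== LEMMAS AND PROOFS =====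

theorem pv_foldl_max_max (t : List Int) (a b : Int) :
    List.foldl max (max a b) t = max a (List.foldl max b t) := by
  induction t generalizing b with
  | nil => rfl
  | cons c t ih =>
      simp only [List.foldl]
      rw [max_assoc]
      exact ih (max b c)

theorem pv_max?_append (xs ys : List Int) (hx : xs ≠ []) (hy : ys ≠ []) :
    (PySem.List.max? (xs ++ ys) (fun y => y)).getD 0
      = max ((PySem.List.max? xs (fun y => y)).getD 0)
            ((PySem.List.max? ys (fun y => y)).getD 0) := by
  obtain ⟨x, xt, rfl⟩ := List.exists_cons_of_ne_nil hx
  obtain ⟨y, yt, rfl⟩ := List.exists_cons_of_ne_nil hy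
  rw [List.cons_append, PySem.List.max?_id_cons, PySem.List.max?_id_cons,
      PySem.List.max?_id_cons]
  simp only [Option.getD_some, List.foldl_append, List.foldl]
  exact pv_foldl_max_max yt (List.foldl max x xt) y

def pvSeg (l : List Int) (i j : Nat) : List Int := (l.drop i).take (j + 1 - i)

def pvM (l : List Int) (i j : Nat) : Int :=
  (PySem.List.max? (pvSeg l i j) (fun y => y)).getD 0

theorem pvSeg_ne_nil (l : List Int) (i j : Nat) (hij : i ≤ j) (hi : i < l.length) :
    pvSeg l i j ≠ [] := by
  have : (pvSeg l i j).length = min (j + 1 - i) (l.length - i) := by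
    simp [pvSeg]
  intro h
  rw [h] at this
  simp at this
  omega

theorem pvSeg_split (l : List Int) (i m j : Nat) (him : i ≤ m) (hmj : m < j) :
    pvSeg l i j = pvSeg l i m ++ pvSeg l (m + 1) j := by
  unfold pvSeg
  have h1 : j + 1 - i = (m + 1 - i) + (j - m) := by omega
  rw [h1, List.take_add, List.drop_drop]
  have h2 : i + (m + 1 - i) = m + 1 := by omega
  have h3 : j - m = j + 1 - (m + 1) := by omega
  rw [h2, h3]

theorem pvM_split (l : List Int) (i m j : Nat) (him : i ≤ m) (hmj : m < j)
    (hj : j < l.length) :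
    pvM l i j = max (pvM l i m) (pvM l (m + 1) j) := by
  unfold pvM
  rw [pvSeg_split l i m j him hmj]
  exact pv_max?_append _ _ (pvSeg_ne_nil l i m him (by omega))
    (pvSeg_ne_nil l (m + 1) j (by omega) (by omega))

theorem pvSeg_single (l : List Int) (i : Nat) (hi : i < l.length) :
    pvSeg l i i = [l[i]] := by
  unfold pvSeg
  have h1 : i + 1 - i = 1 := by omega
  rw [h1, List.drop_eq_getElem_cons hi]
  rfl

-- main invariant: on a valid natural range, pvSolve's first component is the
-- interval maximum and A's result is pvSolve's second component
theorem pv_main (l : List Int) : ∀ k i j : Nat, j - i ≤ k → i ≤ j → j < l.length →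
    ((pvSolve l (i : Int) (j : Int)).1 = pvM l i j ∧
     ∀ n : Int, max_prize l (i : Int) (j : Int) n = (pvSolve l (i : Int) (j : Int)).2) := by
  intro k
  induction k with
  | zero =>
      intro i j hk hij hj
      have hii : i = j := by omega
      subst hii
      have hget : (PySem.List.pyGet? l (i : Int)).getD 0 = l[i] := by
        rw [PySem.List.pyGet?_natCast]
        simp [hj]
      have hsolve : pvSolve l (i : Int) (i : Int) = (l[i], l[i]) := by
        rw [pvSolve.eq_def]
        simp [List.getElem?_eq_getElem hj]
      constructor
      · rw [hsolve, pvM, pvSeg_single l i hj, PySem.List.max?_id_cons]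
        simp
      · intro n
        rw [max_prize.eq_def, hsolve]
        simp [List.getElem?_eq_getElem hj]
  | succ k ih =>
      intro i j hk hij hj
      by_cases hej : i = j
      · subst hej
        exact ih i i (by omega) (by omega) hj
      have hlt : i < j := by omega
      -- midpoint
      have hmid : PySem.Int.floordiv ((i : Int) + (j : Int)) 2 = (((i + j) / 2 : Nat) : Int) := by
        exact_mod_cast PySem.Int.floordiv_natCast (i + j) 2
      set m : Nat := (i + j) / 2 with hm
      have him : i ≤ m := by omega
      have hmj : m < j := by omega
      obtain ⟨ihL1, ihL2⟩ := ih i m (by omega) him (by omega)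
      obtain ⟨ihR1, ihR2⟩ := ih (m + 1) j (by omega) (by omega) hj
      have hcastm : (m : Int) + 1 = ((m + 1 : Nat) : Int) := by push_cast; ring
      -- unfold pvSolve once
      have hsolve : pvSolve l (i : Int) (j : Int) =
          (max (pvSolve l (i : Int) (m : Int)).1 (pvSolve l ((m + 1 : Nat) : Int) (j : Int)).1,
           max ((pvSolve l (i : Int) (m : Int)).1 + (pvSolve l ((m + 1 : Nat) : Int) (j : Int)).2)
               ((pvSolve l ((m + 1 : Nat) : Int) (j : Int)).1 + (pvSolve l (i : Int) (m : Int)).2)) := by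
        rw [pvSolve.eq_def]
        rw [if_neg (by exact_mod_cast by omega : ¬ (j : Int) ≤ (i : Int))]
        simp only [hmid, hcastm]
      -- the slice maxima in A are pvM values
      have hsliceL : PySem.List.slice l (some (i : Int)) (some ((((i + j) / 2 : Nat) : Int) + 1)) = pvSeg l i m := by
        rw [← hm, hcastm, PySem.List.slice_natCast]
        rfl
      have hsliceR : PySem.List.slice l (some ((((i + j) / 2 : Nat) : Int) + 1)) (some ((j : Int) + 1)) = pvSeg l (m + 1) j := by
        rw [← hm, hcastm]
        have : (j : Int) + 1 = ((j + 1 : Nat) : Int) := by push_cast; ring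
        rw [this, PySem.List.slice_natCast]
        rfl
      constructor
      · rw [hsolve]
        simp only []
        rw [ihL1, ihR1]
        exact (pvM_split l i m j him hmj hj).symm
      · intro n
        have hcastj : (j : Int) + 1 = ((j + 1 : Nat) : Int) := by push_cast; ring
        have hsliceL : PySem.List.slice l (some (i : Int)) (some ((m + 1 : Nat) : Int)) = pvSeg l i m := by
          rw [PySem.List.slice_natCast]
          rfl
        have hsliceR : PySem.List.slice l (some ((m + 1 : Nat) : Int)) (some ((j + 1 : Nat) : Int)) = pvSeg l (m + 1) j := by
          rw [PySem.List.slice_natCast]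
          rfl
        rw [max_prize.eq_def]
        rw [if_neg (by exact_mod_cast by omega : ¬ (i : Int) > (j : Int)),
            if_neg (by exact_mod_cast by omega : ¬ (i : Int) = (j : Int))]
        simp only [hmid, hcastm, hcastj, hsliceL, hsliceR, ihL2 1, ihR2 1]
        rw [hsolve, ihL1, ihR1]
        simp only [pvM]
        by_cases h : (PySem.List.max? (pvSeg l i m) fun y => y).getD 0 + (pvSolve l ((m + 1 : Nat) : Int) (j : Int)).2 >
            (PySem.List.max? (pvSeg l (m + 1) j) fun y => y).getD 0 + (pvSolve l (i : Int) (m : Int)).2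
        · rw [if_pos h, max_eq_left (le_of_lt h)]
        · rw [if_neg h, max_eq_right (by omega)]


-- Python's negative-index wraparound: shifting both bounds by -len is invisible
theorem pv_pyGet_shift (l : List Int) (i : Nat) (hi : i < l.length) :
    PySem.List.pyGet? l ((i : Int) - l.length) = PySem.List.pyGet? l (i : Int) := by
  unfold PySem.List.pyGet? PySem.List.pyIdx?
  split_ifs <;> first | omega | rfl | (congr 2; omega)

theorem pv_clampIdx_neg (n : Nat) (a : Int) (h : -(n : Int) ≤ a) (h2 : a < 0) :
    PySem.List.clampIdx n a = (a + n).toNat := by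
  simp [PySem.List.clampIdx]
  split_ifs <;> omega

theorem pv_slice_shift (l : List Int) (a b : Nat) (ha : a < l.length) (hb : b < l.length) :
    PySem.List.slice l (some ((a : Int) - l.length)) (some ((b : Int) - l.length))
      = PySem.List.slice l (some (a : Int)) (some (b : Int)) := by
  have h1 : PySem.List.clampIdx l.length ((a : Int) - l.length) = a := by
    rw [pv_clampIdx_neg _ _ (by omega) (by omega)]; omega
  have h2 : PySem.List.clampIdx l.length ((b : Int) - l.length) = b := by
    rw [pv_clampIdx_neg _ _ (by omega) (by omega)]; omega
  simp [PySem.List.slice, h1, h2]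
  rw [Nat.min_eq_left (Nat.le_of_lt ha), Nat.min_eq_left (Nat.le_of_lt hb)]

theorem pv_floordiv_shift (x : Int) (c : Nat) :
    PySem.Int.floordiv (x - 2 * (c : Int)) 2 = PySem.Int.floordiv x 2 - c := by
  rw [PySem.Int.floordiv_eq_ediv_of_pos (by omega), PySem.Int.floordiv_eq_ediv_of_pos (by omega)]
  omega

-- A and B are invariant under shifting a fully negative in-range window by -len
theorem pv_shift (l : List Int) : ∀ k i j : Nat, j - i ≤ k → i ≤ j → j < l.length →
    ((j : Int) ≤ (l.length : Int) - 2 ∨ i = j) →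
    (pvSolve l ((i : Int) - l.length) ((j : Int) - l.length) = pvSolve l (i : Int) (j : Int) ∧
     ∀ n : Int, max_prize l ((i : Int) - l.length) ((j : Int) - l.length) n
        = max_prize l (i : Int) (j : Int) n) := by
  intro k
  induction k with
  | zero =>
      intro i j hk hij hj _hside
      have hii : i = j := by omega
      subst hii
      have hgetS : PySem.List.pyGet? l ((i : Int) - l.length) = PySem.List.pyGet? l (i : Int) :=
        pv_pyGet_shift l i hj
      constructor
      · rw [pvSolve.eq_def, pvSolve.eq_def]
        rw [if_pos (by omega : (i : Int) - l.length ≤ (i : Int) - l.length),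
            if_pos (le_refl (i : Int)), hgetS]
      · intro n
        rw [max_prize.eq_def, max_prize.eq_def]
        rw [if_neg (by omega : ¬ (i : Int) - l.length > (i : Int) - l.length),
            if_neg (by omega : ¬ (i : Int) > (i : Int)),
            if_pos rfl, if_pos rfl, hgetS]
  | succ k ih =>
      intro i j hk hij hj hside
      by_cases hej : i = j
      · exact ih i j (by omega) hij hj hside
      have hlt : i < j := by omega
      have hj2 : (j : Int) ≤ (l.length : Int) - 2 := by
        rcases hside with h | h
        · exact h
        · omega
      have hmid : PySem.Int.floordiv (((i : Int) - l.length) + ((j : Int) - l.length)) 2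
          = (((i + j) / 2 : Nat) : Int) - l.length := by
        have h1 : ((i : Int) - l.length) + ((j : Int) - l.length)
            = ((i : Int) + (j : Int)) - 2 * (l.length : Int) := by ring
        rw [h1, pv_floordiv_shift]
        have h2 : PySem.Int.floordiv ((i : Int) + (j : Int)) 2 = (((i + j) / 2 : Nat) : Int) := by
          exact_mod_cast PySem.Int.floordiv_natCast (i + j) 2
        rw [h2]
      have hmidP : PySem.Int.floordiv ((i : Int) + (j : Int)) 2 = (((i + j) / 2 : Nat) : Int) := by
        exact_mod_cast PySem.Int.floordiv_natCast (i + j) 2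
      set m : Nat := (i + j) / 2 with hm
      have him : i ≤ m := by omega
      have hmj : m < j := by omega
      have hcastm : ((m : Int) - l.length) + 1 = ((m + 1 : Nat) : Int) - l.length := by
        push_cast; ring
      have hcastm' : (m : Int) + 1 = ((m + 1 : Nat) : Int) := by push_cast; ring
      have hcastj : ((j : Int) - l.length) + 1 = ((j + 1 : Nat) : Int) - l.length := by
        push_cast; ring
      have hcastj' : (j : Int) + 1 = ((j + 1 : Nat) : Int) := by push_cast; ring
      obtain ⟨ihL1, ihL2⟩ := ih i m (by omega) him (by omega) (by left; omega)
      obtain ⟨ihR1, ihR2⟩ := ih (m + 1) j (by omega) (by omega) hj (by left; exact hj2)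
      have hsl1 : PySem.List.slice l (some ((i : Int) - l.length)) (some (((m + 1 : Nat) : Int) - l.length))
          = PySem.List.slice l (some (i : Int)) (some ((m + 1 : Nat) : Int)) :=
        pv_slice_shift l i (m + 1) (by omega) (by omega)
      have hsl2 : PySem.List.slice l (some (((m + 1 : Nat) : Int) - l.length)) (some (((j + 1 : Nat) : Int) - l.length))
          = PySem.List.slice l (some ((m + 1 : Nat) : Int)) (some ((j + 1 : Nat) : Int)) :=
        pv_slice_shift l (m + 1) (j + 1) (by omega) (by omega)
      constructor
      · rw [pvSolve.eq_def]
        rw [if_neg (by omega : ¬ (j : Int) - l.length ≤ (i : Int) - l.length)]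
        conv_rhs => rw [pvSolve.eq_def]
        rw [if_neg (by exact_mod_cast by omega : ¬ (j : Int) ≤ (i : Int))]
        simp only [hmid, hmidP, hcastm, hcastm', ihL1, ihR1]
      · intro n
        rw [max_prize.eq_def]
        rw [if_neg (by omega : ¬ (i : Int) - l.length > (j : Int) - l.length),
            if_neg (by omega : ¬ (i : Int) - l.length = (j : Int) - l.length)]
        conv_rhs => rw [max_prize.eq_def]
        rw [if_neg (by exact_mod_cast by omega : ¬ (i : Int) > (j : Int)),
            if_neg (by exact_mod_cast by omega : ¬ (i : Int) = (j : Int))]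
        simp only [hmid, hmidP, hcastm, hcastm', hcastj, hcastj', hsl1, hsl2,
          ihL2 1, ihR2 1]

-- ===== VERDICT (by name: the statement is the Claim_ definition above) =====
theorem max_prize_spec : Claim_equal_max_prize := by
  intro teams start end_ n _hdom hpre
  unfold Spec_max_prize max_prize_alt
  by_cases hgt : start > end_
  · rw [max_prize.eq_def, if_pos hgt, if_pos hgt]
  rw [if_neg hgt]
  have hle : start ≤ end_ := by omega
  have hpos : ∀ i j : Nat, i ≤ j → j < teams.length →
      max_prize teams (i : Int) (j : Int) n = (pvSolve teams (i : Int) (j : Int)).2 :=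
    fun i j hij hj => (pv_main teams (j - i) i j (by omega) hij hj).2 n
  rcases hpre with h | ⟨h0, hlen⟩ | ⟨h1, h2, h3⟩ | ⟨heq, h1, h2⟩
  · exact absurd h hgt
  · -- 0 ≤ start ≤ end_ < len
    obtain ⟨i, rfl⟩ : ∃ i : Nat, start = (i : Int) := ⟨start.toNat, by omega⟩
    obtain ⟨j, rfl⟩ : ∃ j : Nat, end_ = (j : Int) := ⟨end_.toNat, by omega⟩
    exact hpos i j (by exact_mod_cast hle) (by exact_mod_cast hlen)
  · -- -len ≤ start ≤ end_ ≤ -2 : the wraparound window, shifted by len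
    obtain ⟨i, hi⟩ : ∃ i : Nat, start = (i : Int) - teams.length :=
      ⟨(start + teams.length).toNat, by omega⟩
    obtain ⟨j, hjj⟩ : ∃ j : Nat, end_ = (j : Int) - teams.length :=
      ⟨(end_ + teams.length).toNat, by omega⟩
    subst hi hjj
    have hij : i ≤ j := by omega
    have hjlt : j < teams.length := by omega
    obtain ⟨hB, hA⟩ := pv_shift teams (j - i) i j (by omega) hij hjlt (by left; omega)
    rw [hA n, hB, hpos i j hij hjlt]
  · -- singleton start = end_, possibly negative
    subst heq
    by_cases hs : 0 ≤ start
    · obtain ⟨i, rfl⟩ : ∃ i : Nat, start = (i : Int) := ⟨start.toNat, by omega⟩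
      exact hpos i i (le_refl i) (by exact_mod_cast h2)
    · obtain ⟨i, hi⟩ : ∃ i : Nat, start = (i : Int) - teams.length :=
        ⟨(start + teams.length).toNat, by omega⟩
      subst hi
      have hjlt : i < teams.length := by omega
      obtain ⟨hB, hA⟩ := pv_shift teams 0 i i (by omega) (le_refl i) hjlt (by right; rfl)
      rw [hA n, hB, hpos i i (le_refl i) hjlt]
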